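-- pv_equiv track=rewrite | github.com/seoyoungsoo/Programmers_Challenge | Lv2/lv2_더맵게.py | solution
-- ===== SOURCE A (Python) =====
-- import heapq
--
-- def solution(scoville, K):
--     cnt = 0
--     heapq.heapify(scoville)
--
--     while scoville:
--         if scoville[0] < K and len(scoville) > 1:
--             tmp1 = heapq.heappop(scoville)
--             tmp2 = heapq.heappop(scoville)
--             heapq.heappush(scoville, tmp1 + (tmp2 * 2))
--             cnt += 1
--         else:
--             break
--
--     if scoville[0] < K:
--         return -1
--     else:
--         return cnt
-- ===== SOURCE B (Python) =====
-- # Two-queue merge instead of a heap: sort the input once into a FIFO of original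
-- # foods; combined foods go, in the order produced, into a second FIFO.  Combined
-- # values are produced in nondecreasing order (any values a,b popped while an older
-- # combined value a'+2b' is still queued survived that earlier merge, so a,b >= b'
-- # and a+2b >= 3b' >= a'+2b'), so the two smallest foods are always among the two
-- # queue fronts and no priority structure is needed.
-- # Unlike A (which heapifies the caller's list in place), B does not mutate its
-- # argument; return values agree.
-- def solution(scoville, K):
--     pending = sorted(scoville)   # original foods, consumed front to back
--     merged = []                  # combined foods, produced in nondecreasing order
--     i = j = cnt = 0
--
--     def smallest():
--         if j >= len(merged) or (i < len(pending) and pending[i] <= merged[j]):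
--             return pending[i]    # IndexError here iff the pot is empty, as in A
--         return merged[j]
--
--     while (len(pending) - i) + (len(merged) - j) > 1:
--         if smallest() >= K:
--             break
--         if i < len(pending) and (j >= len(merged) or pending[i] <= merged[j]):
--             a = pending[i]; i += 1
--         else:
--             a = merged[j]; j += 1
--         if i < len(pending) and (j >= len(merged) or pending[i] <= merged[j]):
--             b = pending[i]; i += 1
--         else:
--             b = merged[j]; j += 1
--         merged.append(a + b * 2)
--         cnt += 1
--
--     return -1 if smallest() < K else cnt
-- ===== Notes on version B (the rewrite author's own statement) =====
-- stated objective: alternative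
-- what changed: Replaces the binary heap with the two-queue merge technique: sort the input once into a FIFO, append each combined value to a second FIFO (combined values are provably produced in nondecreasing order), and take each minimum as the smaller of the two queue fronts, so no priority structure or ordered insertion is maintained at all.
import Mathlib
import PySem

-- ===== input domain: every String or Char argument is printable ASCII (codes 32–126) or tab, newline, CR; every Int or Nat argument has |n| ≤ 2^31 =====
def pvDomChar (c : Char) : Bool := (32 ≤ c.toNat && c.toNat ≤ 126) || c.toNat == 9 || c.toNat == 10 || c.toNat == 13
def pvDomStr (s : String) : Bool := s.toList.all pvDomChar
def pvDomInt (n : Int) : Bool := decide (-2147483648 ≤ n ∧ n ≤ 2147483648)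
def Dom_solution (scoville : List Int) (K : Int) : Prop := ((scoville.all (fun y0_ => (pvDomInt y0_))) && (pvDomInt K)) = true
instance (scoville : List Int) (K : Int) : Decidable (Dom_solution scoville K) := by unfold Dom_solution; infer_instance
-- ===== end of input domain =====

-- B replaces A's binary heap with the two-queue merge technique: sort once into a FIFO,
-- append combined values to a second FIFO (they arise in nondecreasing order), pop the
-- smaller front; return values agree — note A heap-orders the caller's list in place
-- while B leaves it untouched (return-value equivalence only).


-- ===== PORT A =====
-- heapq is modelled value-exactly: only popped values and the count reach the return
-- value, so heapify is the identity on the multiset, heap[0]/heappop read/remove the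
-- minimum value, and heappush appends (elements are ints: equal values are
-- indistinguishable, so this is exact for the returned value).
def minVal (xs : List Int) : Int :=
  match xs with
  | [] => 0            -- only read on a nonempty heap
  | a :: t => t.foldl min a

lemma foldl_min_mem : ∀ (t : List Int) (a : Int), t.foldl min a ∈ a :: t := by
  intro t
  induction t with
  | nil => intro a; simp
  | cons b t' ih =>
    intro a
    have h := ih (min a b)
    simp only [List.foldl_cons]
    rcases List.mem_cons.mp h with h1 | h1
    · rcases min_choice a b with h2 | h2 <;> rw [h1, h2] <;> simp
    · simp [h1]

lemma minVal_mem (xs : List Int) (h : xs ≠ []) : minVal xs ∈ xs := by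
  cases xs with
  | nil => exact absurd rfl h
  | cons a t => exact foldl_min_mem t a

-- heappop: return the heap's minimum, remove one occurrence of it
def popMin (xs : List Int) : Int × List Int := (minVal xs, xs.erase (minVal xs))

lemma popMin_snd_length (xs : List Int) (h : xs ≠ []) :
    (popMin xs).2.length = xs.length - 1 := by
  simp [popMin, List.length_erase_of_mem (minVal_mem xs h)]

-- the while-loop of A: returns (final heap contents, cnt)
def aLoop (heap : List Int) (K : Int) (cnt : Int) : List Int × Int :=
  if h1 : heap = [] then (heap, cnt)
  else if h2 : minVal heap < K ∧ 1 < heap.length then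
    -- tmp1 := heappop; tmp2 := heappop; heappush (tmp1 + tmp2 * 2); cnt += 1
    aLoop ((popMin (popMin heap).2).2 ++ [(popMin heap).1 + (popMin (popMin heap).2).1 * 2])
      K (cnt + 1)
  else (heap, cnt)
termination_by heap.length
decreasing_by
  have e1 : (popMin heap).2.length = heap.length - 1 := popMin_snd_length heap h1
  have hr1 : (popMin heap).2 ≠ [] := by
    intro hc; rw [hc] at e1; simp at e1; omega
  have e2 : (popMin (popMin heap).2).2.length = (popMin heap).2.length - 1 :=
    popMin_snd_length _ hr1
  simp only [List.length_append, List.length_cons, List.length_nil]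
  omega

def solution (scoville : List Int) (K : Int) : Int :=
  let r := aLoop scoville K 0
  if r.1 = [] then -1        -- Python raises IndexError at scoville[0] here (empty input; outside Pre_)
  else if minVal r.1 < K then -1 else r.2

-- ===== PORT B =====
-- Source B's two queues: `pending` (sorted input, consumed front to back) and `merged`
-- (combined values, appended at the back).  Index-based consumption in Python is
-- ported as consuming the list head (exact: indices only ever move forward).
-- Source B's pop rule: take from `pending` iff it is nonempty and its front ≤ merged's front
def popF (p m : List Int) : Int × List Int × List Int :=
  match p, m with
  | [], [] => (0, [], [])          -- never reached (guarded by the length test)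
  | [], y :: m' => (y, [], m')
  | x :: p', [] => (x, p', [])
  | x :: p', y :: m' => if x ≤ y then (x, p', y :: m') else (y, x :: p', m')

-- Source B's smallest(): the smaller front; none = IndexError on an empty pot
def front2 (p m : List Int) : Option Int :=
  match p, m with
  | [], [] => none
  | [], y :: _ => some y
  | x :: _, [] => some x
  | x :: _, y :: _ => some (if x ≤ y then x else y)

lemma popF_len (p m : List Int) (h : 1 ≤ p.length + m.length) :
    (popF p m).2.1.length + (popF p m).2.2.length + 1 = p.length + m.length := by
  match p, m with
  | [], [] => simp at h
  | [], y :: m' => simp [popF]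
  | x :: p', [] => simp [popF]
  | x :: p', y :: m' =>
    by_cases hxy : x ≤ y <;> simp [popF, hxy] <;> omega

-- the while-loop of B: while total remaining > 1 and smallest() < K,
-- pop the two smallest fronts, append a + b*2 to merged, cnt += 1
def bLoop (p m : List Int) (K : Int) (cnt : Int) : (List Int × List Int) × Int :=
  if h1 : 1 < p.length + m.length then
    if (popF p m).1 < K then       -- smallest() < K (total ≥ 2, so it exists)
      bLoop (popF (popF p m).2.1 (popF p m).2.2).2.1
        ((popF (popF p m).2.1 (popF p m).2.2).2.2
          ++ [(popF p m).1 + (popF (popF p m).2.1 (popF p m).2.2).1 * 2])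
        K (cnt + 1)
    else ((p, m), cnt)
  else ((p, m), cnt)
termination_by p.length + m.length
decreasing_by
  have e1 : (popF p m).2.1.length + (popF p m).2.2.length + 1 = p.length + m.length :=
    popF_len p m (by omega)
  have e2 : (popF (popF p m).2.1 (popF p m).2.2).2.1.length
      + (popF (popF p m).2.1 (popF p m).2.2).2.2.length + 1
      = (popF p m).2.1.length + (popF p m).2.2.length :=
    popF_len _ _ (by omega)
  simp only [List.length_append, List.length_cons, List.length_nil]
  omega

def solution_alt (scoville : List Int) (K : Int) : Int :=
  let r := bLoop (PySem.List.sorted scoville (fun x => x) false) [] K 0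
  match front2 r.1.1 r.1.2 with
  | none => -1               -- Python raises IndexError in smallest() here (empty input; outside Pre_)
  | some v => if v < K then -1 else r.2

-- ===== PRECONDITION & SPEC =====
-- Pre_ excludes only the empty list, on which both A and B raise IndexError.
def Pre_solution (scoville : List Int) (K : Int) : Prop := scoville ≠ []
instance (scoville : List Int) (K : Int) : Decidable (Pre_solution scoville K) := by
  unfold Pre_solution; infer_instance

def pvWitness_solution : List Int × Int := ([1, 2, 3, 9, 10, 12], 7)

def Spec_solution (scoville : List Int) (K : Int) (out : Int) : Prop := out = solution_alt scoville K
instance (scoville : List Int) (K : Int) (out : Int) : Decidable (Spec_solution scoville K out) := by unfold Spec_solution; infer_instance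

-- ===== CLAIM (what is proved, stated in full; the proofs are below) =====
def Claim_equal_solution : Prop := ∀ (scoville : List Int) (K : Int), Dom_solution scoville K → Pre_solution scoville K → Spec_solution scoville K (solution scoville K)

-- ===== LEMMAS AND PROOFS =====

def SortedLe (l : List Int) : Prop := l.Pairwise (fun a b : Int => a ≤ b)

-- the two-queue invariant: every merged value is ≤ 3c for a bound c that is ≤ every
-- pending value and ≤ every merged value except possibly the most recent one
def GoodBack (p m : List Int) : Prop :=
  ∃ c : Int, (∀ x ∈ m, x ≤ 3 * c) ∧ (∀ y ∈ p, c ≤ y) ∧ (∀ y ∈ m.dropLast, c ≤ y)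

lemma foldl_min_le : ∀ (t : List Int) (a : Int), ∀ y ∈ a :: t, t.foldl min a ≤ y := by
  intro t
  induction t with
  | nil => intro a y hy; simp at hy; simp [hy]
  | cons b t' ih =>
    intro a y hy
    simp only [List.foldl_cons]
    rcases List.mem_cons.mp hy with h1 | h1
    · calc t'.foldl min (min a b) ≤ min a b := ih (min a b) _ (by simp)
        _ ≤ a := min_le_left _ _
        _ = y := h1.symm
    · rcases List.mem_cons.mp h1 with h2 | h2
      · calc t'.foldl min (min a b) ≤ min a b := ih (min a b) _ (by simp)
          _ ≤ b := min_le_right _ _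
          _ = y := h2.symm
      · exact ih (min a b) _ (List.mem_cons_of_mem _ h2)

lemma minVal_le (xs : List Int) (y : Int) (hy : y ∈ xs) : minVal xs ≤ y := by
  cases xs with
  | nil => simp at hy
  | cons a t => exact foldl_min_le t a y hy

lemma minVal_unique (xs : List Int) (v : Int) (hmem : v ∈ xs)
    (hle : ∀ y ∈ xs, v ≤ y) : minVal xs = v :=
  le_antisymm (minVal_le xs v hmem) (hle _ (minVal_mem xs (List.ne_nil_of_mem hmem)))

lemma minVal_perm (l l' : List Int) (h : l.Perm l') (hne : l ≠ []) :
    minVal l = minVal l' := by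
  have hne' : l' ≠ [] := by intro hc; rw [hc] at h; exact hne h.eq_nil
  exact le_antisymm
    (minVal_le l _ (h.mem_iff.mpr (minVal_mem l' hne')))
    (minVal_le l' _ (h.mem_iff.mp (minVal_mem l hne)))

lemma sorted_head_le (x : Int) (t : List Int) (h : SortedLe (x :: t)) :
    ∀ y ∈ x :: t, x ≤ y := by
  intro y hy
  rcases List.mem_cons.mp hy with h1 | h1
  · exact le_of_eq h1.symm
  · exact (List.pairwise_cons.mp h).1 y h1

lemma sorted_tail (x : Int) (t : List Int) (h : SortedLe (x :: t)) : SortedLe t :=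
  (List.pairwise_cons.mp h).2

-- structure of a pop: the value is the removed head of one queue, the other is untouched
lemma popF_struct (p m : List Int) (h : 1 ≤ p.length + m.length) :
    (p = (popF p m).1 :: (popF p m).2.1 ∧ (popF p m).2.2 = m) ∨
    (m = (popF p m).1 :: (popF p m).2.2 ∧ (popF p m).2.1 = p) := by
  match p, m with
  | [], [] => simp at h
  | [], y :: m' => right; simp [popF]
  | x :: p', [] => left; simp [popF]
  | x :: p', y :: m' =>
    by_cases hxy : x ≤ y
    · left; simp [popF, hxy]
    · right; simp [popF, hxy]

-- on sorted queues the popped value is the global minimum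
lemma popF_min (p m : List Int) (sp : SortedLe p) (sm : SortedLe m) :
    ∀ y ∈ p ++ m, (popF p m).1 ≤ y := by
  match p, m with
  | [], [] => simp
  | [], y :: m' =>
    intro z hz; simp only [List.nil_append] at hz
    exact sorted_head_le y m' sm z hz
  | x :: p', [] =>
    intro z hz; simp only [List.append_nil] at hz
    exact sorted_head_le x p' sp z hz
  | x :: p', y :: m' =>
    intro z hz
    rcases List.mem_append.mp hz with h1 | h1
    · by_cases hxy : x ≤ y
      · simpa [popF, hxy] using sorted_head_le x p' sp z h1
      · have := sorted_head_le x p' sp z h1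
        simp only [popF, if_neg hxy]
        omega
    · by_cases hxy : x ≤ y
      · have := sorted_head_le y m' sm z h1
        simp only [popF, if_pos hxy]
        omega
      · simpa [popF, hxy] using sorted_head_le y m' sm z h1

lemma mem_dropLast_head (a : Int) (t : List Int) (h : t ≠ []) :
    a ∈ (a :: t).dropLast := by
  match t with
  | [] => exact absurd rfl h
  | b :: t' => simp [List.dropLast_cons₂]

lemma mem_dropLast_cons (a x : Int) (t : List Int) (hx : x ∈ t.dropLast) :
    x ∈ (a :: t).dropLast := by
  match t with
  | [] => simp at hx
  | b :: t' => simp [List.dropLast_cons₂]; right; exact hx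

lemma sorted_concat (l : List Int) (v : Int) (hl : SortedLe l)
    (hv : ∀ x ∈ l, x ≤ v) : SortedLe (l ++ [v]) := by
  unfold SortedLe at *
  rw [List.pairwise_append]
  exact ⟨hl, List.pairwise_singleton _ _, fun x hx y hy => by
    rw [List.mem_singleton] at hy; subst hy; exact hv x hx⟩

lemma popF_mem (p m : List Int) (h : 1 ≤ p.length + m.length) :
    (popF p m).1 ∈ p ++ m := by
  match p, m with
  | [], [] => simp at h
  | [], y :: m' => simp [popF]
  | x :: p', [] => simp [popF]
  | x :: p', y :: m' => by_cases hxy : x ≤ y <;> simp [popF, hxy]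

lemma popF_eq_min (p m : List Int) (sp : SortedLe p) (sm : SortedLe m)
    (h : 1 ≤ p.length + m.length) : minVal (p ++ m) = (popF p m).1 :=
  minVal_unique _ _ (popF_mem p m h) (popF_min p m sp sm)

lemma front2_eq (p m : List Int) (h : p ++ m ≠ []) :
    front2 p m = some (popF p m).1 := by
  match p, m with
  | [], [] => simp at h
  | [], y :: m' => simp [front2, popF]
  | x :: p', [] => simp [front2, popF]
  | x :: p', y :: m' => by_cases hxy : x ≤ y <;> simp [front2, popF, hxy]

lemma aLoop_step (hp : List Int) (K cnt : Int) (hne : hp ≠ [])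
    (hc : minVal hp < K ∧ 1 < hp.length) :
    aLoop hp K cnt =
      aLoop ((hp.erase (minVal hp)).erase (minVal (hp.erase (minVal hp)))
        ++ [minVal hp + minVal (hp.erase (minVal hp)) * 2]) K (cnt + 1) := by
  rw [aLoop, dif_neg hne, dif_pos hc]
  simp only [popMin]

lemma aLoop_stop (hp : List Int) (K cnt : Int) (hne : hp ≠ [])
    (hc : ¬ (minVal hp < K ∧ 1 < hp.length)) :
    aLoop hp K cnt = (hp, cnt) := by
  rw [aLoop, dif_neg hne, dif_neg hc]

-- MAIN INVARIANT: A's heap stays a permutation of B's two queues, counts agree,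
-- the queues stay sorted and GoodBack, and emptiness is preserved
lemma loop_agree : ∀ (n : Nat) (p m hp : List Int) (K cnt : Int),
    p.length + m.length ≤ n →
    SortedLe p → SortedLe m → GoodBack p m →
    hp.Perm (p ++ m) →
    (aLoop hp K cnt).2 = (bLoop p m K cnt).2 ∧
    (aLoop hp K cnt).1.Perm ((bLoop p m K cnt).1.1 ++ (bLoop p m K cnt).1.2) ∧
    SortedLe (bLoop p m K cnt).1.1 ∧ SortedLe (bLoop p m K cnt).1.2 ∧
    (p ++ m ≠ [] → (bLoop p m K cnt).1.1 ++ (bLoop p m K cnt).1.2 ≠ []) := by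
  intro n
  induction n with
  | zero =>
    intro p m hp K cnt hlen hsp hsm hgb hperm
    have hp0 : p = [] := List.eq_nil_of_length_eq_zero (by omega)
    have hm0 : m = [] := List.eq_nil_of_length_eq_zero (by omega)
    subst hp0; subst hm0
    have hhp : hp = [] := List.Perm.eq_nil (by simpa using hperm)
    subst hhp
    have hA : aLoop ([] : List Int) K cnt = ([], cnt) := by rw [aLoop]; simp
    have hB : bLoop ([] : List Int) [] K cnt = (([], []), cnt) := by rw [bLoop]; simp
    rw [hA, hB]
    exact ⟨rfl, by simp, by simp [SortedLe], by simp [SortedLe], fun h => absurd rfl h⟩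
  | succ n ih =>
    intro p m hp K cnt hlen hsp hsm hgb hperm
    have hlhp : hp.length = p.length + m.length := by
      have := hperm.length_eq; simpa [List.length_append] using this
    by_cases h1 : 1 < p.length + m.length
    · -- total ≥ 2
      have hpne : hp ≠ [] := by
        intro hc; rw [hc] at hlhp; simp at hlhp; omega
      rcases e1 : popF p m with ⟨v1, p1, m1⟩
      have hlen1' : p1.length + m1.length + 1 = p.length + m.length := by
        have := popF_len p m (by omega); rw [e1] at this; exact this
      have hst1 : (p = v1 :: p1 ∧ m1 = m) ∨ (m = v1 :: m1 ∧ p1 = p) := by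
        have := popF_struct p m (by omega); rw [e1] at this; exact this
      have hmin1 : ∀ y ∈ p ++ m, v1 ≤ y := by
        have := popF_min p m hsp hsm; rw [e1] at this; exact this
      have hminhp : minVal hp = v1 := by
        rw [minVal_perm hp (p ++ m) hperm hpne]
        have := popF_eq_min p m hsp hsm (by omega); rw [e1] at this; exact this
      have hsp1 : SortedLe p1 := by
        rcases hst1 with ⟨ha, _⟩ | ⟨_, hb⟩
        · exact sorted_tail v1 p1 (ha ▸ hsp)
        · rw [hb]; exact hsp
      have hsm1 : SortedLe m1 := by
        rcases hst1 with ⟨_, hb⟩ | ⟨ha, _⟩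
        · rw [hb]; exact hsm
        · exact sorted_tail v1 m1 (ha ▸ hsm)
      have hsub_p1 : ∀ x ∈ p1, x ∈ p := by
        rcases hst1 with ⟨ha, _⟩ | ⟨_, hb⟩
        · intro x hx; rw [ha]; exact List.mem_cons_of_mem _ hx
        · rw [hb]; exact fun x hx => hx
      have hsub_m1 : ∀ x ∈ m1, x ∈ m := by
        rcases hst1 with ⟨_, hb⟩ | ⟨ha, _⟩
        · rw [hb]; exact fun x hx => hx
        · intro x hx; rw [ha]; exact List.mem_cons_of_mem _ hx
      have hpm1 : (p ++ m).Perm (v1 :: (p1 ++ m1)) := by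
        rcases hst1 with ⟨ha, hb⟩ | ⟨ha, hb⟩
        · rw [ha, hb]; simp
        · rw [ha, hb]; exact List.perm_middle
      by_cases hK : v1 < K
      · -- both loops iterate
        rcases e2 : popF p1 m1 with ⟨v2, P, M⟩
        have hlen2' : P.length + M.length + 1 = p1.length + m1.length := by
          have := popF_len p1 m1 (by omega); rw [e2] at this; exact this
        have hst2 : (p1 = v2 :: P ∧ M = m1) ∨ (m1 = v2 :: M ∧ P = p1) := by
          have := popF_struct p1 m1 (by omega); rw [e2] at this; exact this
        have hmin2 : ∀ y ∈ p1 ++ m1, v2 ≤ y := by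
          have := popF_min p1 m1 hsp1 hsm1; rw [e2] at this; exact this
        have hv2mem : v2 ∈ p1 ++ m1 := by
          have := popF_mem p1 m1 (by omega); rw [e2] at this; exact this
        have hv1v2 : v1 ≤ v2 :=
          hmin1 v2 (hpm1.symm.subset (List.mem_cons_of_mem _ hv2mem))
        have hsP : SortedLe P := by
          rcases hst2 with ⟨ha, _⟩ | ⟨_, hb⟩
          · exact sorted_tail v2 P (ha ▸ hsp1)
          · rw [hb]; exact hsp1
        have hsM : SortedLe M := by
          rcases hst2 with ⟨_, hb⟩ | ⟨ha, _⟩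
          · rw [hb]; exact hsm1
          · exact sorted_tail v2 M (ha ▸ hsm1)
        have hsub_P : ∀ x ∈ P, x ∈ p1 := by
          rcases hst2 with ⟨ha, _⟩ | ⟨_, hb⟩
          · intro x hx; rw [ha]; exact List.mem_cons_of_mem _ hx
          · rw [hb]; exact fun x hx => hx
        have hsub_M : ∀ x ∈ M, x ∈ m1 := by
          rcases hst2 with ⟨_, hb⟩ | ⟨ha, _⟩
          · rw [hb]; exact fun x hx => hx
          · intro x hx; rw [ha]; exact List.mem_cons_of_mem _ hx
        have hpm2 : (p1 ++ m1).Perm (v2 :: (P ++ M)) := by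
          rcases hst2 with ⟨ha, hb⟩ | ⟨ha, hb⟩
          · rw [ha, hb]; simp
          · rw [ha, hb]; exact List.perm_middle
        obtain ⟨c, hc1, hc2, hc3⟩ := hgb
        -- the invariant's bound applies to both popped values whenever M is nonempty
        have hcv : ∀ x ∈ M, c ≤ v1 ∧ c ≤ v2 := by
          intro x hx
          constructor
          · rcases hst1 with ⟨ha, _⟩ | ⟨ha, _⟩
            · exact hc2 v1 (by rw [ha]; simp)
            · have hm1ne : m1 ≠ [] := List.ne_nil_of_mem (hsub_M x hx)
              exact hc3 v1 (by rw [ha]; exact mem_dropLast_head v1 m1 hm1ne)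
          · have hMne : M ≠ [] := List.ne_nil_of_mem hx
            rcases hst2 with ⟨ha, _⟩ | ⟨ha, _⟩
            · exact hc2 v2 (hsub_p1 v2 (by rw [ha]; simp))
            · rcases hst1 with ⟨_, hb⟩ | ⟨hb, _⟩
              · exact hc3 v2 (by rw [← hb, ha]; exact mem_dropLast_head v2 M hMne)
              · exact hc3 v2 (by
                  rw [hb, ha]
                  exact mem_dropLast_cons v1 v2 (v2 :: M) (mem_dropLast_head v2 M hMne))
        have hMle : ∀ x ∈ M, x ≤ v1 + v2 * 2 := by
          intro x hx
          have h3c := hc1 x (hsub_m1 x (hsub_M x hx))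
          obtain ⟨ha, hb⟩ := hcv x hx
          omega
        have hsMnew : SortedLe (M ++ [v1 + v2 * 2]) := sorted_concat M _ hsM hMle
        have hgbnew : GoodBack P (M ++ [v1 + v2 * 2]) := by
          refine ⟨v2, ?_, ?_, ?_⟩
          · intro x hx
            rcases List.mem_append.mp hx with hxm | hxv
            · have h3c := hc1 x (hsub_m1 x (hsub_M x hxm))
              obtain ⟨_, hb⟩ := hcv x hxm
              omega
            · rw [List.mem_singleton] at hxv; omega
          · intro y hy
            exact hmin2 y (List.mem_append_left _ (hsub_P y hy))
          · intro y hy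
            rw [List.dropLast_concat] at hy
            exact hmin2 y (List.mem_append_right _ (hsub_M y hy))
        -- B takes a step
        have hBeq : bLoop p m K cnt = bLoop P (M ++ [v1 + v2 * 2]) K (cnt + 1) := by
          conv_lhs => rw [bLoop]
          rw [dif_pos h1, e1]
          dsimp only
          rw [e2]
          dsimp only
          rw [if_pos hK]
        -- A takes the same step
        have hemA1 : (hp.erase v1).Perm (p1 ++ m1) := by
          have := (hperm.trans hpm1).erase v1
          rwa [List.erase_cons_head] at this
        have h1ne : hp.erase v1 ≠ [] := by
          intro hc
          have := hemA1.length_eq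
          rw [hc] at this
          simp [List.length_append] at this
          omega
        have hminhp2 : minVal (hp.erase v1) = v2 := by
          rw [minVal_perm _ _ hemA1 h1ne]
          have := popF_eq_min p1 m1 hsp1 hsm1 (by omega); rw [e2] at this; exact this
        have hemA2 : ((hp.erase v1).erase v2).Perm (P ++ M) := by
          have := (hemA1.trans hpm2).erase v2
          rwa [List.erase_cons_head] at this
        have hAeq : aLoop hp K cnt =
            aLoop ((hp.erase v1).erase v2 ++ [v1 + v2 * 2]) K (cnt + 1) := by
          have := aLoop_step hp K cnt hpne (by rw [hminhp]; exact ⟨hK, by omega⟩)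
          rwa [hminhp, hminhp2] at this
        have hpermnew : ((hp.erase v1).erase v2 ++ [v1 + v2 * 2]).Perm
            (P ++ (M ++ [v1 + v2 * 2])) := by
          have h := hemA2.append_right [v1 + v2 * 2]
          rwa [List.append_assoc] at h
        have hlt : P.length + (M ++ [v1 + v2 * 2]).length ≤ n := by
          simp only [List.length_append, List.length_cons, List.length_nil]
          omega
        have IH := ih P (M ++ [v1 + v2 * 2]) ((hp.erase v1).erase v2 ++ [v1 + v2 * 2])
          K (cnt + 1) hlt hsP hsMnew hgbnew hpermnew
        rw [hAeq, hBeq]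
        exact ⟨IH.1, IH.2.1, IH.2.2.1, IH.2.2.2.1, fun _ => IH.2.2.2.2 (by simp)⟩
      · -- the minimum is already ≥ K: both loops stop
        have hBeq : bLoop p m K cnt = ((p, m), cnt) := by
          conv_lhs => rw [bLoop]
          rw [dif_pos h1, e1]
          dsimp only
          rw [if_neg hK]
        have hAeq : aLoop hp K cnt = (hp, cnt) :=
          aLoop_stop hp K cnt hpne (by rw [hminhp]; intro hc; exact hK hc.1)
        rw [hAeq, hBeq]
        refine ⟨rfl, hperm, hsp, hsm, fun h => h⟩
    · -- total ≤ 1: both loops stop immediately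
      have hBeq : bLoop p m K cnt = ((p, m), cnt) := by
        rw [bLoop, dif_neg h1]
      have hAeq : aLoop hp K cnt = (hp, cnt) := by
        by_cases hpe : hp = []
        · subst hpe; rw [aLoop]; simp
        · exact aLoop_stop hp K cnt hpe (by intro hc; omega)
      rw [hAeq, hBeq]
      exact ⟨rfl, hperm, hsp, hsm, fun h => h⟩

-- ===== VERDICT (by name: the statement is the Claim_ definition above) =====
theorem solution_spec : Claim_equal_solution := by
  intro scoville K _ hpre
  unfold Spec_solution
  simp only [solution, solution_alt]
  have hsort : SortedLe (PySem.List.sorted scoville (fun x => x) false) :=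
    PySem.List.sorted_pairwise scoville (fun x => x)
  have hperm : scoville.Perm (PySem.List.sorted scoville (fun x => x) false ++ []) := by
    simpa using (PySem.List.sorted_perm scoville (fun x => x) false).symm
  have hs0ne : PySem.List.sorted scoville (fun x => x) false ≠ [] := by
    intro h
    exact hpre ((PySem.List.sorted_eq_nil_iff scoville (fun x => x) false).mp h)
  have hgb : GoodBack (PySem.List.sorted scoville (fun x => x) false) [] :=
    ⟨minVal (PySem.List.sorted scoville (fun x => x) false), by simp,
      fun y hy => minVal_le _ y hy, by simp⟩
  obtain ⟨hcnt, hperm', hsp, hsm, hne'⟩ :=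
    loop_agree (PySem.List.sorted scoville (fun x => x) false).length
      (PySem.List.sorted scoville (fun x => x) false) [] scoville K 0
      (by simp) hsort (by simp [SortedLe]) hgb hperm
  have hUne : (bLoop (PySem.List.sorted scoville (fun x => x) false) [] K 0).1.1
      ++ (bLoop (PySem.List.sorted scoville (fun x => x) false) [] K 0).1.2 ≠ [] :=
    hne' (by simpa using hs0ne)
  have hAne : (aLoop scoville K 0).1 ≠ [] := by
    intro hc; rw [hc] at hperm'; exact hUne hperm'.symm.eq_nil
  have hlen1 : 1 ≤ (bLoop (PySem.List.sorted scoville (fun x => x) false) [] K 0).1.1.length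
      + (bLoop (PySem.List.sorted scoville (fun x => x) false) [] K 0).1.2.length := by
    have := List.length_pos_of_ne_nil hUne
    simp only [List.length_append] at this
    omega
  have hminA : minVal (aLoop scoville K 0).1
      = (popF (bLoop (PySem.List.sorted scoville (fun x => x) false) [] K 0).1.1
          (bLoop (PySem.List.sorted scoville (fun x => x) false) [] K 0).1.2).1 := by
    rw [minVal_perm _ _ hperm' hAne]
    exact popF_eq_min _ _ hsp hsm hlen1
  rw [if_neg hAne, front2_eq _ _ hUne, hminA, hcnt]
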